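-- pv_equiv track=rewrite | github.com/kaydee0502/Data-Structure-and-Algorithms-using-Python | DSA/cp/ws.py | solve
-- ===== SOURCE A (Python) =====
-- import string
--
-- w = {x:y for x,y in zip(string.ascii_lowercase,[i for i in range(1,27)])}
--
-- def solve(s):
--     u = {}
--     l = {}
--
--     for i in s:
--         if i.islower():
--             if not i in l:
--                 l[i] = 0
--             l[i] +=1
--         else:
--             if not i in u:
--                 u[i] = 0
--
--             u[i] += 1
--
--
--     for i in l:
--         l[i] = [l[i]*w[i.lower()],l[i]]
--
--     for i in u:
--         u[i] = [u[i]*w[i.lower()],u[i]]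
--
--
--
--     ls = []
--     us = []
--     for i in l:
--         ls.append((l[i][0],l[i][1],i))
--
--     for i in u:
--         us.append((u[i][0],u[i][1],i))
--
--     ls.sort(key = lambda x : (x[0], -x[1], x[2]))
--     us.sort(key = lambda x : (x[0], -x[1], x[2]))
--     i = 0
--     j = 0
--     res = ""
--
--     while i < len(ls) and j < len(us):
--         if ls[i][0] <= us[j][0]:
--             res += ls[i][2]*ls[i][1]
--             i+=1
--         else:
--             res += us[j][2]*us[j][1]
--             j+=1
--
--     while i < len(ls):
--         res += ls[i][2]*ls[i][1]
--         i+=1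
--
--     while j < len(us):
--         res += us[j][2]*us[j][1]
--         j+=1
--
--     return res
-- ===== SOURCE B (Python) =====
-- import string
--
-- w = {c: i for i, c in enumerate(string.ascii_lowercase, 1)}
--
-- def solve(s):
--     cnt = {}
--     for ch in s:
--         cnt[ch] = cnt.get(ch, 0) + 1
--     order = sorted(cnt.items(),
--                    key=lambda kv: (kv[1] * w[kv[0].lower()], not kv[0].islower(), -kv[1], kv[0]))
--     return ''.join(ch * c for ch, c in order)
-- ===== Notes on version B (the rewrite author's own statement) =====
-- stated objective: simpler
-- what changed: One counting dict and a single sort by the combined key (weight, not islower, -count, char) replace A's two per-case dicts, two separate sorts and the three two-pointer merge loops.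
import Mathlib
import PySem

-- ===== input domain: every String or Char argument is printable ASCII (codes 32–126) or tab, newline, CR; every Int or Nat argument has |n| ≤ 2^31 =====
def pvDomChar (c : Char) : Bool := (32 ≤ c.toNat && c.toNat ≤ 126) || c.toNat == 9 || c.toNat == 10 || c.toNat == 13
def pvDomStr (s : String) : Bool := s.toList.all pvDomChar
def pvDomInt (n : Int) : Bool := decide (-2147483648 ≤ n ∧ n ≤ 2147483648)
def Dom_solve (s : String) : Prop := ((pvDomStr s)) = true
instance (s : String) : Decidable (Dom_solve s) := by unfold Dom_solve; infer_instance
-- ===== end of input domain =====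

-- B replaces A's two per-case count dicts, two separate sorts and three merge loops by one
-- count dict and a single sort on the combined key (weight, not islower, -count, char): simpler.

-- ===== PORT A =====
-- module constant w = {a:1, …, z:26} built from zip(string.ascii_lowercase, range(1, 27))
def wDict : PySem.Dict Char Int :=
  (List.zip "abcdefghijklmnopqrstuvwxyz".toList (PySem.List.pyRange 1 27 1)).foldl
    (fun d p => d.insert p.1 p.2) PySem.Dict.empty

-- Python tuple sort key (x[0], -x[1], x[2]) as a lexicographically ordered Int list
-- (the char by its code point — exactly how Python compares the one-char strings)
def keyA (x : Int × Int × Char) : List Int := [x.1, -x.2.1, (x.2.2.toNat : Int)]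

-- Python's sorted(xs, key=k) with a tuple key, the tuple as an Int list (used by both ports)
def sortK {α : Type} (xs : List α) (key : α → List Int) : List α :=
  PySem.List.sorted xs key false

-- res += ch * n
def repA (x : Int × Int × Char) : List Char := PySem.List.pyRepeat [x.2.2] x.2.1

-- the loop body `if not i in d: d[i] = 0` followed by `d[i] += 1`
def bumpA (d : PySem.Dict Char Int) (c : Char) : PySem.Dict Char Int :=
  let d' := if d.contains c then d else d.insert c 0
  d'.insert c (d'.getD c 0 + 1)

-- the first `for` loop: fill the dicts l (lowercase) and u (the rest)
def countsA (cs : List Char) : PySem.Dict Char Int × PySem.Dict Char Int :=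
  cs.foldl
    (fun lu c => if PySem.Chars.islower c then (bumpA lu.1 c, lu.2) else (lu.1, bumpA lu.2 c))
    (PySem.Dict.empty, PySem.Dict.empty)

-- `for i in d: d[i] = [d[i]*w[i.lower()], d[i]]`: the value TYPE changes, so the typed port
-- rebuilds the same dict (same keys, same order) with pair values; w[i.lower()] via getD is
-- exact only under Pre_solve (Python raises KeyError on non-letter characters)
def weighDictA (d : PySem.Dict Char Int) : PySem.Dict Char (Int × Int) :=
  d.items.foldl
    (fun d2 p => d2.insert p.1 (p.2 * wDict.getD (PySem.Chars.lowerChar p.1) 0, p.2))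
    PySem.Dict.empty

-- `for i in d: out.append((d[i][0], d[i][1], i))` — the dict iterated in insertion order
def listifyA (d : PySem.Dict Char (Int × Int)) : List (Int × Int × Char) :=
  d.items.foldl (fun acc p => acc ++ [(p.2.1, p.2.2, p.1)]) []

-- the main merge `while`; the two trailing `while` loops are the nil cases
def mergeA : List (Int × Int × Char) → List (Int × Int × Char) → List Char → List Char
  | [], us, res => us.foldl (fun r x => r ++ repA x) res
  | a :: ls, [], res => (a :: ls).foldl (fun r x => r ++ repA x) res
  | a :: ls, b :: us, res =>
      if a.1 ≤ b.1 then mergeA ls (b :: us) (res ++ repA a)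
      else mergeA (a :: ls) us (res ++ repA b)
  termination_by ls us _ => ls.length + us.length

def solve (s : String) : String :=
  let lu := countsA s.toList
  let ls := listifyA (weighDictA lu.1)
  let us := listifyA (weighDictA lu.2)
  String.ofList (mergeA (sortK ls keyA) (sortK us keyA) [])

-- ===== PORT B =====
-- w = {c: i for i, c in enumerate(string.ascii_lowercase, 1)}
def wAlt : PySem.Dict Char Int :=
  (PySem.List.enumerate "abcdefghijklmnopqrstuvwxyz".toList 1).foldl
    (fun d p => d.insert p.2 p.1) PySem.Dict.empty

-- sort key (count*weight, not islower — False < True, i.e. 0 < 1 —, -count, char), as a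
-- lexicographically ordered Int list (the char by its code point, as Python compares it)
def keyB (p : Char × Int) : List Int :=
  [p.2 * wAlt.getD (PySem.Chars.lowerChar p.1) 0,
   if PySem.Chars.islower p.1 then (0 : Int) else 1, -p.2, (p.1.toNat : Int)]

def solve_alt (s : String) : String :=
  let cnt := s.toList.foldl (fun d c => d.insert c (d.getD c 0 + 1))
    (PySem.Dict.empty : PySem.Dict Char Int)
  let order := sortK cnt.items keyB
  String.ofList (order.flatMap (fun p => PySem.List.pyRepeat [p.1] p.2))

-- ===== PRECONDITION & SPEC =====
-- Pre_solve: every character is a letter; on any other character both Pythons raise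
-- KeyError at w[ch.lower()], so A returns exactly on the strings Pre_solve admits.
def Pre_solve (s : String) : Prop := (s.toList.all (fun c => PySem.Chars.isalpha c)) = true
instance (s : String) : Decidable (Pre_solve s) := by unfold Pre_solve; infer_instance

def pvWitness_solve : String := "bBaacC"

def Spec_solve (s : String) (out : String) : Prop := out = solve_alt s
instance (s : String) (out : String) : Decidable (Spec_solve s out) := by
  unfold Spec_solve; infer_instance

-- ===== CLAIM (what is proved, stated in full; the proofs are below) =====
def Claim_equal_solve : Prop := ∀ (s : String), Dom_solve s → Pre_solve s → Spec_solve s (solve s)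

-- ===== LEMMAS AND PROOFS =====

-- proof-only abbreviations
def wgt (k : Char) : Int := wDict.getD (PySem.Chars.lowerChar k) 0
def flagI (c : Char) : Int := if PySem.Chars.islower c then 0 else 1
-- the combined order of the merged output, on triples
def keyC (x : Int × Int × Char) : List Int :=
  [x.1, flagI x.2.2, -x.2.1, (x.2.2.toNat : Int)]
def emb (p : Char × Int) : Int × Int × Char := (p.2 * wgt p.1, p.2, p.1)
-- the triple a distinct char k of cs contributes
def tripleOf (cs : List Char) (k : Char) : Int × Int × Char :=
  ((cs.count k : Int) * wgt k, (cs.count k : Int), k)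

-- pure tuple merge underlying mergeA
def mergeT : List (Int × Int × Char) → List (Int × Int × Char) → List (Int × Int × Char)
  | [], us => us
  | a :: ls, [] => a :: ls
  | a :: ls, b :: us =>
      if a.1 ≤ b.1 then a :: mergeT ls (b :: us) else b :: mergeT (a :: ls) us
  termination_by ls us => ls.length + us.length

theorem wAlt_eq_wDict : wAlt = wDict := by decide

theorem bumpA_eq (d : PySem.Dict Char Int) (c : Char) :
    bumpA d c = d.insert c (d.getD c 0 + 1) := by
  unfold bumpA
  by_cases h : d.contains c = true
  · simp [h]
  · simp only [Bool.not_eq_true] at h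
    simp [h, PySem.Dict.getD_insert_self, PySem.Dict.insert_insert_self,
      PySem.Dict.getD_of_not_contains]

theorem mergeA_eq (ls us : List (Int × Int × Char)) (res : List Char) :
    mergeA ls us res = res ++ (mergeT ls us).flatMap repA := by
  fun_induction mergeA ls us res with
  | case1 us res => rw [PySem.List.foldl_append_eq_flatMap, mergeT]
  | case2 a ls res => rw [PySem.List.foldl_append_eq_flatMap, mergeT]
  | case3 a ls b us res h ih => simp [mergeT, h, ih]
  | case4 a ls b us res h ih => simp [mergeT, h, ih]

theorem mergeT_perm (ls us : List (Int × Int × Char)) :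
    (mergeT ls us).Perm (ls ++ us) := by
  fun_induction mergeT ls us with
  | case1 us => simp
  | case2 a ls => simp
  | case3 a ls b us h ih => simpa using ih.cons a
  | case4 a ls b us h ih => exact (ih.cons b).trans List.perm_middle.symm

theorem keyA_lt_iff (x y : Int × Int × Char) :
    keyA x < keyA y ↔ x.1 < y.1 ∨ (x.1 = y.1 ∧ (-x.2.1 < -y.2.1 ∨ (-x.2.1 = -y.2.1 ∧ (x.2.2.toNat : Int) < (y.2.2.toNat : Int)))) := by
  simp [keyA, List.cons_lt_cons_iff]

theorem keyC_lt_iff (x y : Int × Int × Char) :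
    keyC x < keyC y ↔ x.1 < y.1 ∨ (x.1 = y.1 ∧ (flagI x.2.2 < flagI y.2.2 ∨ (flagI x.2.2 = flagI y.2.2 ∧ (-x.2.1 < -y.2.1 ∨ (-x.2.1 = -y.2.1 ∧ (x.2.2.toNat : Int) < (y.2.2.toNat : Int)))))) := by
  simp [keyC, List.cons_lt_cons_iff]

theorem charToNat_inj {c d : Char} (h : c.toNat = d.toNat) : c = d := by
  simpa [Char.ofNat_toNat] using congrArg Char.ofNat h

theorem keyA_inj : Function.Injective keyA := by
  intro x y h
  simp only [keyA, List.cons.injEq, and_true, Int.natCast_inj] at h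
  obtain ⟨h1, h2, h3⟩ := h
  exact Prod.ext h1 (Prod.ext (by omega) (charToNat_inj h3))

theorem keyB_inj : Function.Injective keyB := by
  intro x y h
  simp only [keyB, List.cons.injEq, and_true, Int.natCast_inj] at h
  exact Prod.ext (charToNat_inj h.2.2.2) (by omega)

theorem keyC_of_keyA (x y : Int × Int × Char) (hf : flagI x.2.2 = flagI y.2.2)
    (h : keyA x < keyA y) : keyC x < keyC y := by
  rw [keyA_lt_iff] at h; rw [keyC_lt_iff]; tauto

theorem keyA_fst_le (x y : Int × Int × Char) (h : keyA x < keyA y) : x.1 ≤ y.1 := by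
  rw [keyA_lt_iff] at h; rcases h with h | ⟨h, _⟩ <;> omega

theorem keyC_cross (x y : Int × Int × Char) (hxy : x.1 ≤ y.1)
    (hfx : PySem.Chars.islower x.2.2 = true) (hfy : PySem.Chars.islower y.2.2 = false) :
    keyC x < keyC y := by
  rw [keyC_lt_iff]
  rcases lt_or_eq_of_le hxy with h | h
  · exact Or.inl h
  · exact Or.inr ⟨h, Or.inl (by simp [flagI, hfx, hfy])⟩

theorem keyC_of_fst_lt (x y : Int × Int × Char) (h : x.1 < y.1) : keyC x < keyC y := by
  rw [keyC_lt_iff]; exact Or.inl h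

theorem merge_pairwise (ls us : List (Int × Int × Char))
    (hl : ∀ x ∈ ls, PySem.Chars.islower x.2.2 = true)
    (hu : ∀ x ∈ us, PySem.Chars.islower x.2.2 = false)
    (pl : ls.Pairwise (fun a b => keyA a < keyA b))
    (pu : us.Pairwise (fun a b => keyA a < keyA b)) :
    (mergeT ls us).Pairwise (fun a b => keyC a < keyC b) := by
  fun_induction mergeT ls us with
  | case1 us =>
      exact pu.imp_of_mem (fun {a b} ha hb h =>
        keyC_of_keyA a b (by simp [flagI, hu a ha, hu b hb]) h)
  | case2 a ls =>
      exact pl.imp_of_mem (fun {x y} hx hy h =>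
        keyC_of_keyA x y (by simp [flagI, hl x hx, hl y hy]) h)
  | case3 a ls b us h ih =>
      rw [List.pairwise_cons] at pl ⊢
      refine ⟨?_, ih (fun x hx => hl x (List.mem_cons_of_mem a hx)) hu pl.2 pu⟩
      intro y hy
      have hy' := (mergeT_perm ls (b :: us)).mem_iff.mp hy
      rw [List.mem_append] at hy'
      rcases hy' with hy' | hy'
      · exact keyC_of_keyA a y
          (by simp [flagI, hl a List.mem_cons_self, hl y (List.mem_cons_of_mem a hy')])
          (pl.1 y hy')
      · have hay : a.1 ≤ y.1 := by
          rcases List.mem_cons.mp hy' with rfl | hy'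
          · exact h
          · exact le_trans h (keyA_fst_le b y ((List.pairwise_cons.mp pu).1 y hy'))
        exact keyC_cross a y hay (hl a List.mem_cons_self) (hu y hy')
  | case4 a ls b us h ih =>
      rw [List.pairwise_cons] at pu ⊢
      refine ⟨?_, ih hl (fun x hx => hu x (List.mem_cons_of_mem b hx)) pl pu.2⟩
      intro y hy
      have hy' := (mergeT_perm (a :: ls) us).mem_iff.mp hy
      rw [List.mem_append] at hy'
      rcases hy' with hy' | hy'
      · have hby : b.1 < y.1 := by
          rcases List.mem_cons.mp hy' with rfl | hy'
          · omega
          · have := keyA_fst_le a y ((List.pairwise_cons.mp pl).1 y hy'); omega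
        exact keyC_of_fst_lt b y hby
      · exact keyC_of_keyA b y
          (by simp [flagI, hu b List.mem_cons_self, hu y (List.mem_cons_of_mem b hy')])
          (pu.1 y hy')

-- bridges from the PySem sorted lemmas to sortK (aligning the DecidableLT instances)
theorem sortK_perm {α : Type} (xs : List α) (key : α → List Int) : (sortK xs key).Perm xs :=
  PySem.List.sorted_perm _ _ _

theorem mem_sortK {α : Type} (xs : List α) (key : α → List Int) (x : α) :
    x ∈ sortK xs key ↔ x ∈ xs := PySem.List.mem_sorted _ _ _ _

theorem sortK_pairwise {α : Type} (xs : List α) (key : α → List Int) :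
    (sortK xs key).Pairwise (fun a b => key a ≤ key b) := by
  unfold sortK
  convert PySem.List.sorted_pairwise xs key using 2

theorem sortK_eq_of_perm_of_pairwise_lt {α : Type} (xs ys : List α) (key : α → List Int)
    (h1 : ys.Perm xs) (h2 : ys.Pairwise (fun a b => key a < key b)) : sortK xs key = ys := by
  unfold sortK
  have h := PySem.List.sorted_eq_of_perm_of_pairwise_lt xs ys key h1 h2
  convert h using 2

-- a stable sort on a duplicate-free list with an injective key is strictly increasing
theorem sortK_pairwise_lt_of_inj {α : Type} (xs : List α) (key : α → List Int)
    (hn : xs.Nodup) (hinj : Function.Injective key) :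
    (sortK xs key).Pairwise (fun a b => key a < key b) := by
  have hS := sortK_pairwise xs key
  have hN : (sortK xs key).Nodup := (sortK_perm xs key).nodup_iff.mpr hn
  exact (hS.and hN).imp (fun {a b} h => lt_of_le_of_ne h.1 (fun he => h.2 (hinj he)))

-- A's first loop computes the two counters of the case-filtered characters
theorem counts_split (cs : List Char) (l u : PySem.Dict Char Int) :
    cs.foldl (fun lu c => if PySem.Chars.islower c then (bumpA lu.1 c, lu.2) else (lu.1, bumpA lu.2 c)) (l, u)
    = ((cs.filter PySem.Chars.islower).foldl (fun d c => d.insert c (d.getD c 0 + 1)) l,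
       (cs.filter (fun c => !PySem.Chars.islower c)).foldl (fun d c => d.insert c (d.getD c 0 + 1)) u) := by
  induction cs generalizing l u with
  | nil => rfl
  | cons c cs ih =>
      by_cases h : PySem.Chars.islower c = true
      · rw [List.foldl_cons, if_pos h, ih]; simp [h, bumpA_eq]
      · simp only [Bool.not_eq_true] at h
        rw [List.foldl_cons, if_neg (by simp [h]), ih]; simp [h, bumpA_eq]

theorem countsA_eq (cs : List Char) :
    countsA cs = (PySem.Dict.counter (cs.filter PySem.Chars.islower),
                  PySem.Dict.counter (cs.filter (fun c => !PySem.Chars.islower c))) := by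
  unfold countsA
  rw [counts_split, PySem.Dict.foldl_insert_getD_add_one_eq_counter,
    PySem.Dict.foldl_insert_getD_add_one_eq_counter]

-- A's second and third loops turn counter X into the triples of X's distinct chars in order
theorem listify_weigh_counter (xs : List Char) :
    listifyA (weighDictA (PySem.Dict.counter xs)) =
      (PySem.Set.ofList xs).map (tripleOf xs) := by
  unfold listifyA weighDictA
  rw [PySem.List.foldl_append_singleton_eq_map]
  have h := PySem.Dict.items_foldl_insert_fresh
      (l := (PySem.Dict.counter xs).items) (d := PySem.Dict.empty)
      (k := Prod.fst) (v := fun p => (p.2 * wDict.getD (PySem.Chars.lowerChar p.1) 0, p.2))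
      (fun a _ => PySem.Dict.contains_empty a.1)
      (by rw [show ((PySem.Dict.counter xs).items.map Prod.fst) = (PySem.Dict.counter xs).keys from rfl,
              PySem.Dict.keys_counter]; exact PySem.Set.nodup_ofList xs)
  simp only [] at h
  rw [h, PySem.Dict.items_counter,
    show (PySem.Dict.empty : PySem.Dict Char (Int × Int)).items = [] from rfl]
  simp only [List.map_map, List.nil_append]
  rfl

theorem tripleOf_inj (cs : List Char) : Function.Injective (tripleOf cs) := by
  intro a b h
  simpa [tripleOf] using congrArg (fun t => t.2.2) h

theorem keyB_eq_keyC_emb (p : Char × Int) : keyB p = keyC (emb p) := by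
  unfold keyB keyC emb flagI wgt
  rw [wAlt_eq_wDict]

theorem solve_spec' (s : String) (_hp : Pre_solve s) : solve s = solve_alt s := by
  set cs := s.toList with hcs
  set SX := PySem.Set.ofList (cs.filter PySem.Chars.islower) with hSX
  set SY := PySem.Set.ofList (cs.filter (fun c => !PySem.Chars.islower c)) with hSY
  have memSX : ∀ k ∈ SX, PySem.Chars.islower k = true := fun k hk => by
    rw [hSX, PySem.Set.mem_ofList, List.mem_filter] at hk
    exact hk.2
  have memSY : ∀ k ∈ SY, PySem.Chars.islower k = false := fun k hk => by
    rw [hSY, PySem.Set.mem_ofList, List.mem_filter] at hk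
    simpa using hk.2
  -- A's two triple lists, with the filtered counts rewritten to counts over cs
  have hls : listifyA (weighDictA (PySem.Dict.counter (cs.filter PySem.Chars.islower)))
      = SX.map (tripleOf cs) := by
    rw [listify_weigh_counter, ← hSX]
    exact List.map_congr_left (fun k hk => by
      unfold tripleOf; rw [List.count_filter (memSX k hk)])
  have hus : listifyA (weighDictA (PySem.Dict.counter (cs.filter (fun c => !PySem.Chars.islower c))))
      = SY.map (tripleOf cs) := by
    rw [listify_weigh_counter, ← hSY]
    exact List.map_congr_left (fun k hk => by
      unfold tripleOf; rw [List.count_filter (by simp [memSY k hk])])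
  -- strict sortedness of A's two sorted lists
  have pl := sortK_pairwise_lt_of_inj (SX.map (tripleOf cs)) keyA
      ((PySem.Set.nodup_ofList _).map (tripleOf_inj cs)) keyA_inj
  have pu := sortK_pairwise_lt_of_inj (SY.map (tripleOf cs)) keyA
      ((PySem.Set.nodup_ofList _).map (tripleOf_inj cs)) keyA_inj
  have hlow : ∀ x ∈ sortK (SX.map (tripleOf cs)) keyA,
      PySem.Chars.islower x.2.2 = true := by
    intro x hx
    rw [mem_sortK, List.mem_map] at hx
    obtain ⟨k, hk, rfl⟩ := hx
    exact memSX k hk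
  have hupp : ∀ x ∈ sortK (SY.map (tripleOf cs)) keyA,
      PySem.Chars.islower x.2.2 = false := by
    intro x hx
    rw [mem_sortK, List.mem_map] at hx
    obtain ⟨k, hk, rfl⟩ := hx
    exact memSY k hk
  -- the merged list is exactly sorted(P, keyC) for the combined triple list P
  have hperm : (mergeT (sortK (SX.map (tripleOf cs)) keyA)
                       (sortK (SY.map (tripleOf cs)) keyA)).Perm
      ((PySem.Set.ofList cs).map (tripleOf cs)) := by
    refine (mergeT_perm _ _).trans ?_
    refine ((sortK_perm _ _).append (sortK_perm _ _)).trans ?_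
    rw [← List.map_append]
    refine List.Perm.map _ ?_
    refine (List.perm_ext_iff_of_nodup ?_ (PySem.Set.nodup_ofList cs)).mpr ?_
    · refine List.Nodup.append (PySem.Set.nodup_ofList _) (PySem.Set.nodup_ofList _) ?_
      intro x hx hy
      have := memSX x hx
      have := memSY x hy
      simp_all
    · intro x
      rw [List.mem_append, hSX, hSY, PySem.Set.mem_ofList, PySem.Set.mem_ofList,
        PySem.Set.mem_ofList, List.mem_filter, List.mem_filter]
      cases h : PySem.Chars.islower x <;> simp_all
  have hmerge : sortK ((PySem.Set.ofList cs).map (tripleOf cs)) keyC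
      = mergeT (sortK (SX.map (tripleOf cs)) keyA)
               (sortK (SY.map (tripleOf cs)) keyA) :=
    sortK_eq_of_perm_of_pairwise_lt _ _ _ hperm
      (merge_pairwise _ _ hlow hupp pl pu)
  -- B's sorted items, mapped through emb, are the same list
  have hPB : ((PySem.Dict.counter cs).items).map emb = (PySem.Set.ofList cs).map (tripleOf cs) := by
    rw [PySem.Dict.items_counter, List.map_map]
    rfl
  have hndB : ((PySem.Dict.counter cs).items).Nodup := by
    rw [PySem.Dict.items_counter]
    exact (PySem.Set.nodup_ofList cs).map (fun a b h => congrArg Prod.fst h)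
  have hsortB : sortK ((PySem.Set.ofList cs).map (tripleOf cs)) keyC
      = (sortK ((PySem.Dict.counter cs).items) keyB).map emb := by
    refine sortK_eq_of_perm_of_pairwise_lt _ _ _ ?_ ?_
    · exact (hPB ▸ (sortK_perm _ _).map emb)
    · rw [List.pairwise_map]
      refine (sortK_pairwise_lt_of_inj _ keyB hndB keyB_inj).imp ?_
      intro a b h
      rwa [keyB_eq_keyC_emb, keyB_eq_keyC_emb] at h
  have hcnt : cs.foldl (fun d c => d.insert c (d.getD c 0 + 1)) PySem.Dict.empty
      = PySem.Dict.counter cs := PySem.Dict.foldl_insert_getD_add_one_eq_counter cs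
  show String.ofList _ = String.ofList _
  rw [countsA_eq, hls, hus, hcnt, mergeA_eq, List.nil_append, ← hmerge, hsortB,
    List.flatMap_map]
  rfl

-- ===== VERDICT (by name: the statement is the Claim_ definition above) =====
theorem solve_spec : Claim_equal_solve := by
  intro s _ hp
  unfold Spec_solve
  exact solve_spec' s hp
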